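-- pv_equiv track=rewrite | github.com/BrianMills2718/sb_ontologies | src/ui/schema_analysis_ui.py | detect_schema_type
-- ===== SOURCE A (Python) =====
-- from typing import List, Dict, Optional
--
-- def detect_schema_type(results: Dict) -> str:
--     """Detect what type of schema/framework was used based on result structure"""
--
--     keys = list(results.keys())
--
--     # Information Disorder framework
--     if 'agents' in keys and 'messages' in keys and 'interpreters' in keys:
--         return "Information Disorder"
--
--     # Argumentation frameworks
--     if any(k in keys for k in ['arguments', 'claims', 'premises', 'conclusions']):
--         return "Argumentation"
--
--     # Behavior Change frameworks
--     if any(k in keys for k in ['behavior_change_techniques', 'interventions', 'barriers']):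
--         return "Behavior Change"
--
--     # Memetic/Cultural Evolution
--     if any(k in keys for k in ['memes', 'replication', 'transmission', 'selection']):
--         return "Cultural Evolution"
--
--     # Action Theory
--     if any(k in keys for k in ['metatheories', 'action_drivers', 'needs']):
--         return "Action Theory"
--
--     # Generic framework
--     return "Generic Framework"
-- ===== SOURCE B (Python) =====
-- # Single pass over the dict's keys with an inverted key->priority index,
-- # instead of scanning the key list once per rule key.
--
-- _PRIO = {
--     'arguments': 1, 'claims': 1, 'premises': 1, 'conclusions': 1,
--     'behavior_change_techniques': 2, 'interventions': 2, 'barriers': 2,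
--     'memes': 3, 'replication': 3, 'transmission': 3, 'selection': 3,
--     'metatheories': 4, 'action_drivers': 4, 'needs': 4,
-- }
-- _LABEL = {1: 'Argumentation', 2: 'Behavior Change',
--           3: 'Cultural Evolution', 4: 'Action Theory'}
--
--
-- def detect_schema_type(results):
--     """Detect what type of schema/framework was used based on result structure"""
--     missing = {'agents', 'messages', 'interpreters'}
--     best = 5
--     for k in results:
--         missing.discard(k)
--         best = min(best, _PRIO.get(k, 5))
--     if not missing:
--         return 'Information Disorder'
--     return _LABEL.get(best, 'Generic Framework')
-- ===== Notes on version B (the rewrite author's own statement) =====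
-- stated objective: alternative
-- what changed: Replaces the rule-by-rule if-chain (each rule scanning the key list with any/all membership tests) by a single pass over the input keys with an inverted key->priority dictionary, a running minimum priority, and a shrinking 'missing' set for the Information Disorder rule.
import Mathlib
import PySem

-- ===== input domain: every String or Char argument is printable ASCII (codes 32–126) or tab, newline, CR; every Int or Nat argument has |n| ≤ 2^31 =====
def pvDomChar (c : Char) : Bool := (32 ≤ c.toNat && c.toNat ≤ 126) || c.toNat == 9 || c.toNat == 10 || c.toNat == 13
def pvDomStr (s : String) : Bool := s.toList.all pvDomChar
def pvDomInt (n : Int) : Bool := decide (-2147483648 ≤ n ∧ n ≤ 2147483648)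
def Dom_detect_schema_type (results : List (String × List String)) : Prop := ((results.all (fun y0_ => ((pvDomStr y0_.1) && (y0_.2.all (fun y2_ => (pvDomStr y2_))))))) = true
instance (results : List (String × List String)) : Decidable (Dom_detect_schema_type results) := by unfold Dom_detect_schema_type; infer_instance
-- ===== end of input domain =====

-- B makes one pass over the input keys with an inverted key->priority index, a running minimum
-- and a shrinking 'missing' set, instead of A's per-rule membership scans (objective: alternative).


-- ===== PORT A =====
def detect_schema_type (results : List (String × List String)) : String :=
  let keys := results.map Prod.fst
  if keys.contains "agents" && keys.contains "messages" && keys.contains "interpreters" then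
    "Information Disorder"
  else if (["arguments", "claims", "premises", "conclusions"]).any (fun k => keys.contains k) then
    "Argumentation"
  else if (["behavior_change_techniques", "interventions", "barriers"]).any (fun k => keys.contains k) then
    "Behavior Change"
  else if (["memes", "replication", "transmission", "selection"]).any (fun k => keys.contains k) then
    "Cultural Evolution"
  else if (["metatheories", "action_drivers", "needs"]).any (fun k => keys.contains k) then
    "Action Theory"
  else
    "Generic Framework"

-- ===== PORT B =====
-- inverted index: trigger key -> priority of its rule (module constant _PRIO in Source B)
def pvPrio : PySem.Dict String Int :=
  ⟨[("arguments", 1), ("claims", 1), ("premises", 1), ("conclusions", 1),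
    ("behavior_change_techniques", 2), ("interventions", 2), ("barriers", 2),
    ("memes", 3), ("replication", 3), ("transmission", 3), ("selection", 3),
    ("metatheories", 4), ("action_drivers", 4), ("needs", 4)]⟩

-- priority -> label (module constant _LABEL in Source B)
def pvLabel : PySem.Dict Int String :=
  ⟨[(1, "Argumentation"), (2, "Behavior Change"),
    (3, "Cultural Evolution"), (4, "Action Theory")]⟩

def detect_schema_type_alt (results : List (String × List String)) : String :=
  -- 'for k in results' iterates the dict's keys in insertion order = results.map Prod.fst
  let st := (results.map Prod.fst).foldl
    (fun (st : PySem.Set String × Int) k =>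
      (PySem.Set.discard st.1 k, min st.2 (PySem.Dict.getD pvPrio k 5)))
    (PySem.Set.ofList ["agents", "messages", "interpreters"], 5)
  if st.1.isEmpty then "Information Disorder"
  else PySem.Dict.getD pvLabel st.2 "Generic Framework"

-- ===== PRECONDITION & SPEC =====
def Spec_detect_schema_type (results : List (String × List String)) (out : String) : Prop := out = detect_schema_type_alt results
instance (results : List (String × List String)) (out : String) : Decidable (Spec_detect_schema_type results out) := by unfold Spec_detect_schema_type; infer_instance

-- ===== CLAIM =====
def Claim_equal_detect_schema_type : Prop := ∀ (results : List (String × List String)), Dom_detect_schema_type results → Spec_detect_schema_type results (detect_schema_type results)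

-- ===== LEMMAS AND PROOFS =====

-- the fold over the pair state is the pair of the two independent folds
theorem pv_fold_pair {α β γ : Type} (f : α → γ → α) (g : β → γ → β)
    (l : List γ) : ∀ (a : α) (b : β),
    l.foldl (fun (st : α × β) k => (f st.1 k, g st.2 k)) (a, b) =
      (l.foldl f a, l.foldl g b) := by
  induction l with
  | nil => intro a b; simp
  | cons k l ih => intro a b; simp [ih]

-- repeated discard = one filter
theorem pv_fold_discard (l : List String) :
    ∀ (s : List String),
      l.foldl (fun s k => PySem.Set.discard s k) s =
        s.filter (fun x => !l.contains x) := by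
  induction l with
  | nil => intro s; simp
  | cons k l ih =>
    intro s
    simp only [List.foldl_cons]
    rw [ih]
    simp only [PySem.Set.discard, List.filter_filter]
    apply List.filter_congr
    intro x _
    simp only [List.contains_cons, Bool.not_or]
    rw [Bool.and_comm]

-- A's four 'any' conditions, as the chain of priorities B's running minimum realises
def pvChain (keys : List String) : Int :=
  if (["arguments", "claims", "premises", "conclusions"]).any (fun k => keys.contains k) then 1
  else if (["behavior_change_techniques", "interventions", "barriers"]).any (fun k => keys.contains k) then 2
  else if (["memes", "replication", "transmission", "selection"]).any (fun k => keys.contains k) then 3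
  else if (["metatheories", "action_drivers", "needs"]).any (fun k => keys.contains k) then 4
  else 5

theorem pvChain_bounds (keys : List String) : 1 ≤ pvChain keys ∧ pvChain keys ≤ 5 := by
  unfold pvChain; split_ifs <;> omega

-- getD on the literal dict, as a plain equality chain
theorem pvPrio_getD (k : String) :
    PySem.Dict.getD pvPrio k 5 =
      if k = "arguments" ∨ k = "claims" ∨ k = "premises" ∨ k = "conclusions" then 1
      else if k = "behavior_change_techniques" ∨ k = "interventions" ∨ k = "barriers" then 2
      else if k = "memes" ∨ k = "replication" ∨ k = "transmission" ∨ k = "selection" then 3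
      else if k = "metatheories" ∨ k = "action_drivers" ∨ k = "needs" then 4
      else 5 := by
  split_ifs with h1 h2 h3 h4
  · rcases h1 with h | h | h | h <;> subst h <;> rfl
  · rcases h2 with h | h | h <;> subst h <;> rfl
  · rcases h3 with h | h | h | h <;> subst h <;> rfl
  · rcases h4 with h | h | h <;> subst h <;> rfl
  · simp only [not_or] at h1 h2 h3 h4
    obtain ⟨n1, n2, n3, n4⟩ := h1
    obtain ⟨n5, n6, n7⟩ := h2
    obtain ⟨n8, n9, n10, n11⟩ := h3
    obtain ⟨n12, n13, n14⟩ := h4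
    have e1 : ("arguments" == k) = false := beq_eq_false_iff_ne.mpr (Ne.symm n1)
    have e2 : ("claims" == k) = false := beq_eq_false_iff_ne.mpr (Ne.symm n2)
    have e3 : ("premises" == k) = false := beq_eq_false_iff_ne.mpr (Ne.symm n3)
    have e4 : ("conclusions" == k) = false := beq_eq_false_iff_ne.mpr (Ne.symm n4)
    have e5 : ("behavior_change_techniques" == k) = false := beq_eq_false_iff_ne.mpr (Ne.symm n5)
    have e6 : ("interventions" == k) = false := beq_eq_false_iff_ne.mpr (Ne.symm n6)
    have e7 : ("barriers" == k) = false := beq_eq_false_iff_ne.mpr (Ne.symm n7)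
    have e8 : ("memes" == k) = false := beq_eq_false_iff_ne.mpr (Ne.symm n8)
    have e9 : ("replication" == k) = false := beq_eq_false_iff_ne.mpr (Ne.symm n9)
    have e10 : ("transmission" == k) = false := beq_eq_false_iff_ne.mpr (Ne.symm n10)
    have e11 : ("selection" == k) = false := beq_eq_false_iff_ne.mpr (Ne.symm n11)
    have e12 : ("metatheories" == k) = false := beq_eq_false_iff_ne.mpr (Ne.symm n12)
    have e13 : ("action_drivers" == k) = false := beq_eq_false_iff_ne.mpr (Ne.symm n13)
    have e14 : ("needs" == k) = false := beq_eq_false_iff_ne.mpr (Ne.symm n14)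
    simp [PySem.Dict.getD, PySem.Dict.get?, pvPrio, List.find?, e1, e2, e3, e4, e5, e6, e7, e8, e9, e10, e11, e12, e13, e14]

theorem pvChain_cons (k : String) (l : List String) :
    pvChain (k :: l) = min (PySem.Dict.getD pvPrio k 5) (pvChain l) := by
  rw [pvPrio_getD]
  split_ifs with h1 h2 h3 h4
  · rcases h1 with h | h | h | h <;> subst h <;>
      unfold pvChain <;>
      simp only [List.any_cons, List.any_nil, List.contains_cons] <;>
      simp <;> split_ifs <;> omega
  · rcases h2 with h | h | h <;> subst h <;>
      unfold pvChain <;>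
      simp only [List.any_cons, List.any_nil, List.contains_cons] <;>
      simp_all <;> split_ifs <;> omega
  · rcases h3 with h | h | h | h <;> subst h <;>
      unfold pvChain <;>
      simp only [List.any_cons, List.any_nil, List.contains_cons] <;>
      simp_all <;> split_ifs <;> omega
  · rcases h4 with h | h | h <;> subst h <;>
      unfold pvChain <;>
      simp only [List.any_cons, List.any_nil, List.contains_cons] <;>
      simp_all <;> split_ifs <;> omega
  · simp only [not_or] at h1 h2 h3 h4
    obtain ⟨n1, n2, n3, n4⟩ := h1
    obtain ⟨n5, n6, n7⟩ := h2
    obtain ⟨n8, n9, n10, n11⟩ := h3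
    obtain ⟨n12, n13, n14⟩ := h4
    have e1 : ("arguments" == k) = false := beq_eq_false_iff_ne.mpr (Ne.symm n1)
    have e2 : ("claims" == k) = false := beq_eq_false_iff_ne.mpr (Ne.symm n2)
    have e3 : ("premises" == k) = false := beq_eq_false_iff_ne.mpr (Ne.symm n3)
    have e4 : ("conclusions" == k) = false := beq_eq_false_iff_ne.mpr (Ne.symm n4)
    have e5 : ("behavior_change_techniques" == k) = false := beq_eq_false_iff_ne.mpr (Ne.symm n5)
    have e6 : ("interventions" == k) = false := beq_eq_false_iff_ne.mpr (Ne.symm n6)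
    have e7 : ("barriers" == k) = false := beq_eq_false_iff_ne.mpr (Ne.symm n7)
    have e8 : ("memes" == k) = false := beq_eq_false_iff_ne.mpr (Ne.symm n8)
    have e9 : ("replication" == k) = false := beq_eq_false_iff_ne.mpr (Ne.symm n9)
    have e10 : ("transmission" == k) = false := beq_eq_false_iff_ne.mpr (Ne.symm n10)
    have e11 : ("selection" == k) = false := beq_eq_false_iff_ne.mpr (Ne.symm n11)
    have e12 : ("metatheories" == k) = false := beq_eq_false_iff_ne.mpr (Ne.symm n12)
    have e13 : ("action_drivers" == k) = false := beq_eq_false_iff_ne.mpr (Ne.symm n13)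
    have e14 : ("needs" == k) = false := beq_eq_false_iff_ne.mpr (Ne.symm n14)
    have hb := pvChain_bounds l
    unfold pvChain at hb ⊢
    simp only [List.any_cons, List.any_nil, List.contains_cons, e1, e2, e3, e4, e5, e6, e7, e8, e9, e10, e11, e12, e13, e14, Bool.false_or, Bool.or_false]
    split_ifs at hb ⊢ <;> omega

theorem pv_fold_min (l : List String) :
    ∀ (b : Int), b ≤ 5 →
      l.foldl (fun b k => min b (PySem.Dict.getD pvPrio k 5)) b = min b (pvChain l) := by
  induction l with
  | nil =>
    intro b hb
    unfold pvChain; simp; omega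
  | cons k l ih =>
    intro b hb
    have hkb : min b (PySem.Dict.getD pvPrio k 5) ≤ 5 := by
      exact le_trans (min_le_left _ _) hb
    simp only [List.foldl_cons, ih _ hkb, pvChain_cons k l]
    omega

-- ===== VERDICT =====
theorem detect_schema_type_spec : Claim_equal_detect_schema_type := by
  intro results _
  unfold Spec_detect_schema_type
  unfold detect_schema_type detect_schema_type_alt
  rw [pv_fold_pair (fun s k => PySem.Set.discard s k)
      (fun b k => min b (PySem.Dict.getD pvPrio k 5))]
  rw [pv_fold_discard]
  rw [pv_fold_min _ 5 le_rfl]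
  have hmin : min (5 : Int) (pvChain (results.map Prod.fst)) = pvChain (results.map Prod.fst) := by
    have := pvChain_bounds (results.map Prod.fst); omega
  rw [hmin]
  have hof : PySem.Set.ofList ["agents", "messages", "interpreters"] =
      ["agents", "messages", "interpreters"] := by rfl
  rw [hof]
  have hfil : (List.filter (fun x => !(results.map Prod.fst).contains x)
        ["agents", "messages", "interpreters"]).isEmpty =
      ((results.map Prod.fst).contains "agents" && (results.map Prod.fst).contains "messages" &&
        (results.map Prod.fst).contains "interpreters") := by
    cases ha : (results.map Prod.fst).contains "agents" <;>
      cases hm : (results.map Prod.fst).contains "messages" <;>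
        cases hi : (results.map Prod.fst).contains "interpreters" <;>
          simp_all [List.filter_nil]
  dsimp only
  rw [hfil]
  unfold pvChain
  split_ifs <;> rfl
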